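-- pv_equiv track=rewrite | github.com/DipperChen2007/Skibidi_Enhancer | S/13/13_s3.py | Chances_of_Winning
-- ===== SOURCE A (Python) =====
-- def Chances_of_Winning(favorite,score,games):
--     rturn = 0
-- # 2. 模拟还没进行的比赛，生成不同结果的分数
-- # [score 1] [score 2] ...
--     check_answer = [score]
--     for game in games:
--         a,b = game
--         arr = []
--         for old_socre in check_answer:
--             for result in [(3, 0),(0, 3), (1, 1)]:
--                 new_scores = old_socre[:]
--                 new_scores[a] += result[0]
--                 new_scores[b] += result[1]
--                 arr.append(new_scores)
--         check_answer = arr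
--     for answer in check_answer:
--         for i in range(1,len(answer)):
--             if i != favorite and answer[i] >= answer[favorite]:
--                 rturn -=1
--                 break
--         rturn += 1
--     return rturn
-- ===== SOURCE B (Python) =====
-- def Chances_of_Winning(favorite, score, games):
--     def count(idx, cur):
--         if idx == len(games):
--             return 1 if all(cur[i] < cur[favorite]
--                             for i in range(1, len(cur)) if i != favorite) else 0
--         a, b = games[idx]
--         total = 0
--         for ra, rb in ((3, 0), (0, 3), (1, 1)):
--             nxt = cur[:]
--             nxt[a] += ra
--             nxt[b] += rb
--             total += count(idx + 1, nxt)
--         return total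
--     return count(0, list(score))
-- ===== Notes on version B (the rewrite author's own statement) =====
-- stated objective: alternative
-- what changed: Replaces A's breadth-first materialisation of all 3^len(games) score vectors followed by a separate counting pass (with its -1/break/+1 bookkeeping) by a depth-first recursion over the game index that carries one score vector and sums 0/1 results at the leaves, using O(len(games)*len(score)) memory instead of O(3^g * n).
import Mathlib
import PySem

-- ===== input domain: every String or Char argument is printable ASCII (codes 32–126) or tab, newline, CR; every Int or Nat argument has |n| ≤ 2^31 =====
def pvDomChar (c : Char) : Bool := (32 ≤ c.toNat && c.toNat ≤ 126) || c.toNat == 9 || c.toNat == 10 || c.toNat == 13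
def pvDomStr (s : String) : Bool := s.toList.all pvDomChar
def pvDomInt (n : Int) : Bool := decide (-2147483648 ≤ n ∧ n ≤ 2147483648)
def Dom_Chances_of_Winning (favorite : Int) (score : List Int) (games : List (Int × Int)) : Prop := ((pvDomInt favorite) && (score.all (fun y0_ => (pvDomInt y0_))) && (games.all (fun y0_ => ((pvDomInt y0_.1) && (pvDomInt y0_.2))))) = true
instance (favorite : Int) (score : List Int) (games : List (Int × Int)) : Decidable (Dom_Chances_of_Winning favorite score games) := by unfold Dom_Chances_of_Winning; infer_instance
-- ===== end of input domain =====

-- B replaces A's breadth-first materialisation of all 3^g score vectors plus a second counting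
-- pass by a depth-first recursion over the games that carries one score vector and sums 0/1 leaves
-- (objective: alternative decomposition, much smaller memory footprint; same exponential time).

-- ===== PORT A =====
-- shared tiny helper: new = old[:]; new[a] += ra; new[b] += rb  (identical line in both Pythons)
def pvApply (old : List Int) (a b ra rb : Int) : List Int :=
  let v1 := PySem.List.pySetD old a (PySem.List.pyGetD old a 0 + ra)
  PySem.List.pySetD v1 b (PySem.List.pyGetD v1 b 0 + rb)

-- the 'for i in range(1, len(answer)): if i != favorite and answer[i] >= answer[favorite]: rturn -= 1; break'
-- loop of A, returning the -1/0 delta it adds to rturn before the unconditional '+= 1'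
def pvAScan (answer : List Int) (favorite : Int) : List Int → Int
  | [] => 0
  | i :: rest =>
      if i ≠ favorite ∧ PySem.List.pyGetD answer favorite 0 ≤ PySem.List.pyGetD answer i 0 then -1
      else pvAScan answer favorite rest

def Chances_of_Winning (favorite : Int) (score : List Int) (games : List (Int × Int)) : Int :=
  let check_answer : List (List Int) :=
    games.foldl
      (fun cs g =>
        cs.foldl
          (fun arr old =>
            arr ++ [((3:Int),(0:Int)), (0,3), (1,1)].map (fun r => pvApply old g.1 g.2 r.1 r.2))
          [])
      [score]
  check_answer.foldl
    (fun rturn answer =>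
      rturn + pvAScan answer favorite (PySem.List.pyRange 1 (answer.length : Int) 1) + 1)
    0

-- ===== PORT B =====
-- lazy 'all(cur[i] < cur[favorite] for i in range(1, len(cur)) if i != favorite)'
def pvBGood (favorite : Int) (cur : List Int) : List Int → Bool
  | [] => true
  | i :: rest =>
      if i = favorite then pvBGood favorite cur rest
      else if PySem.List.pyGetD cur i 0 < PySem.List.pyGetD cur favorite 0 then
        pvBGood favorite cur rest
      else false

-- B's count(idx, cur): recursion on the remaining suffix of games
def pvBCount (favorite : Int) (cur : List Int) : List (Int × Int) → Int
  | [] => if pvBGood favorite cur (PySem.List.pyRange 1 (cur.length : Int) 1) then 1 else 0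
  | (a, b) :: rest =>
      0 + pvBCount favorite (pvApply cur a b 3 0) rest
        + pvBCount favorite (pvApply cur a b 0 3) rest
        + pvBCount favorite (pvApply cur a b 1 1) rest

def Chances_of_Winning_alt (favorite : Int) (score : List Int) (games : List (Int × Int)) : Int :=
  pvBCount favorite score games

-- ===== PRECONDITION & SPEC =====
-- Pre_ excludes exactly the inputs where Python A raises IndexError: a game index outside
-- [-n, n), or a favorite index that the counting loop actually dereferences while out of range
-- (it is never dereferenced when n ≤ 1 or when the only compared index equals favorite, i.e. n = 2 ∧ favorite = 1).
def Pre_Chances_of_Winning (favorite : Int) (score : List Int) (games : List (Int × Int)) : Prop :=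
  (∀ g ∈ games, PySem.Raise.InRange score.length g.1 ∧ PySem.Raise.InRange score.length g.2) ∧
  (PySem.Raise.InRange score.length favorite ∨ score.length ≤ 1 ∨ (score.length = 2 ∧ favorite = 1))
instance (favorite : Int) (score : List Int) (games : List (Int × Int)) : Decidable (Pre_Chances_of_Winning favorite score games) := by unfold Pre_Chances_of_Winning; infer_instance

def pvWitness_Chances_of_Winning : Int × List Int × (List (Int × Int)) := (1, [0, 0, 0], [(0, 1), (1, 2)])

def Spec_Chances_of_Winning (favorite : Int) (score : List Int) (games : List (Int × Int)) (out : Int) : Prop := out = Chances_of_Winning_alt favorite score games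
instance (favorite : Int) (score : List Int) (games : List (Int × Int)) (out : Int) : Decidable (Spec_Chances_of_Winning favorite score games out) := by unfold Spec_Chances_of_Winning; infer_instance

-- ===== CLAIM (what is proved, stated in full; the proofs are below) =====
def Claim_equal_Chances_of_Winning : Prop := ∀ (favorite : Int) (score : List Int) (games : List (Int × Int)), Dom_Chances_of_Winning favorite score games → Pre_Chances_of_Winning favorite score games → Spec_Chances_of_Winning favorite score games (Chances_of_Winning favorite score games)

-- ===== LEMMAS AND PROOFS =====

-- A's break-scan agrees with B's lazy all: -1 exactly where good fails
theorem pvAScan_eq_good (answer : List Int) (favorite : Int) (idxs : List Int) :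
    pvAScan answer favorite idxs = if pvBGood favorite answer idxs then 0 else -1 := by
  induction idxs with
  | nil => simp [pvAScan, pvBGood]
  | cons i rest ih =>
      simp only [pvAScan, pvBGood]
      by_cases h1 : i = favorite
      · simp [h1, ih]
      · by_cases h2 : PySem.List.pyGetD answer i 0 < PySem.List.pyGetD answer favorite 0
        · have : ¬ (i ≠ favorite ∧ PySem.List.pyGetD answer favorite 0 ≤ PySem.List.pyGetD answer i 0) := by
            intro ⟨_, hle⟩; omega
          simp [h1, h2, ih]
        · have : (i ≠ favorite ∧ PySem.List.pyGetD answer favorite 0 ≤ PySem.List.pyGetD answer i 0) := ⟨h1, by omega⟩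
          simp [h1, h2, this]

-- the BFS step of A is a flatMap of the three updates
theorem pvStep_eq_flatMap (cs : List (List Int)) (a b : Int) :
    cs.foldl (fun arr old => arr ++ [((3:Int),(0:Int)), (0,3), (1,1)].map (fun r => pvApply old a b r.1 r.2)) []
      = cs.flatMap (fun old => [pvApply old a b 3 0, pvApply old a b 0 3, pvApply old a b 1 1]) := by
  rw [PySem.List.foldl_append_eq_flatMap]
  rfl

-- A's counting fold over a list of answers, as a sum of 0/1 judgements
def pvJudgeSum (favorite : Int) (cs : List (List Int)) : Int :=
  cs.foldl (fun rturn answer =>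
    rturn + pvAScan answer favorite (PySem.List.pyRange 1 (answer.length : Int) 1) + 1) 0

theorem pvJudgeSum_eq_sum (favorite : Int) (cs : List (List Int)) :
    pvJudgeSum favorite cs
      = (cs.map (fun answer => pvAScan answer favorite (PySem.List.pyRange 1 (answer.length : Int) 1) + 1)).sum := by
  unfold pvJudgeSum
  have h : (fun (rt : Int) (answer : List Int) =>
      rt + pvAScan answer favorite (PySem.List.pyRange 1 (answer.length : Int) 1) + 1)
      = fun rt answer => rt + (pvAScan answer favorite (PySem.List.pyRange 1 (answer.length : Int) 1) + 1) := by
    funext rt answer; ring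
  rw [h, PySem.List.foldl_add]
  simp

theorem pvJudgeSum_append (favorite : Int) (xs ys : List (List Int)) :
    pvJudgeSum favorite (xs ++ ys) = pvJudgeSum favorite xs + pvJudgeSum favorite ys := by
  simp [pvJudgeSum_eq_sum]

-- the whole BFS expansion distributes over an append of start vectors
theorem pvExpand_append (gs : List (Int × Int)) (xs ys : List (List Int)) :
    gs.foldl
        (fun cs g =>
          cs.foldl (fun arr old => arr ++ [((3:Int),(0:Int)), (0,3), (1,1)].map (fun r => pvApply old g.1 g.2 r.1 r.2)) [])
        (xs ++ ys)
      = gs.foldl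
          (fun cs g =>
            cs.foldl (fun arr old => arr ++ [((3:Int),(0:Int)), (0,3), (1,1)].map (fun r => pvApply old g.1 g.2 r.1 r.2)) [])
          xs
        ++ gs.foldl
            (fun cs g =>
              cs.foldl (fun arr old => arr ++ [((3:Int),(0:Int)), (0,3), (1,1)].map (fun r => pvApply old g.1 g.2 r.1 r.2)) [])
            ys := by
  induction gs generalizing xs ys with
  | nil => rfl
  | cons g gs ih =>
      simp only [List.foldl_cons]
      rw [pvStep_eq_flatMap, pvStep_eq_flatMap, pvStep_eq_flatMap, List.flatMap_append, ih]

-- main invariant: counting A's expansion of one start vector equals B's DFS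
theorem pvMain (favorite : Int) (gs : List (Int × Int)) (cur : List Int) :
    pvJudgeSum favorite
      (gs.foldl
        (fun cs g =>
          cs.foldl (fun arr old => arr ++ [((3:Int),(0:Int)), (0,3), (1,1)].map (fun r => pvApply old g.1 g.2 r.1 r.2)) [])
        [cur])
      = pvBCount favorite cur gs := by
  induction gs generalizing cur with
  | nil =>
      simp only [List.foldl_nil, pvBCount, pvJudgeSum, List.foldl_cons, List.foldl_nil]
      rw [pvAScan_eq_good]
      split <;> simp
  | cons g gs ih =>
      obtain ⟨a, b⟩ := g
      have h1 : List.foldl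
            (fun cs g =>
              cs.foldl (fun arr old => arr ++ [((3:Int),(0:Int)), (0,3), (1,1)].map (fun r => pvApply old g.1 g.2 r.1 r.2)) [])
            [cur] ((a, b) :: gs)
          = List.foldl
              (fun cs g =>
                cs.foldl (fun arr old => arr ++ [((3:Int),(0:Int)), (0,3), (1,1)].map (fun r => pvApply old g.1 g.2 r.1 r.2)) [])
              ([pvApply cur a b 3 0] ++ [pvApply cur a b 0 3] ++ [pvApply cur a b 1 1]) gs := by
        rw [List.foldl_cons]
        simp
      rw [h1, pvExpand_append, pvExpand_append, pvJudgeSum_append, pvJudgeSum_append,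
        ih, ih, ih]
      simp [pvBCount]

-- ===== VERDICT (by name: the statement is the Claim_ definition above) =====
theorem Chances_of_Winning_spec : Claim_equal_Chances_of_Winning := by
  intro favorite score games _ _
  unfold Spec_Chances_of_Winning Chances_of_Winning Chances_of_Winning_alt
  exact pvMain favorite games score
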